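-- pv_equiv track=rewrite | github.com/mandarborkar/adventofcode | 2021/avent12b.py | calculatecbc
-- ===== SOURCE A (Python) =====
-- def calculatecbc (x):
--     count = 0
--     counter = []
--     for i in range (len(x)-1,-1,-1):
--         if x[i] == '(':
--             counter.append (1)
--         elif x[i] == '[':
--             counter.append(2)
--         elif x[i] == '{':
--             counter.append(3)
--         elif x[i] == '<':
--             counter.append(4)
--
--     # print (counter)
--
--     for x in counter:
--         count = (count*5) + int(x)
--
--     # print ('Calculating cbc '+ str(x) + ' ' + str(count))
--
--     return count
-- ===== SOURCE B (Python) =====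
-- def calculatecbc(x):
--     vals = {'(': 1, '[': 2, '{': 3, '<': 4}
--     score = 0
--     p = 1
--     for ch in x:
--         if ch in vals:
--             score += vals[ch] * p
--             p *= 5
--     return score
-- ===== Notes on version B (the rewrite author's own statement) =====
-- stated objective: simpler
-- what changed: Replaces the reverse index loop that collects bracket values into a list plus a second Horner multiply-accumulate pass with a single forward pass keeping a running power of 5 and no intermediate list.
import Mathlib
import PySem

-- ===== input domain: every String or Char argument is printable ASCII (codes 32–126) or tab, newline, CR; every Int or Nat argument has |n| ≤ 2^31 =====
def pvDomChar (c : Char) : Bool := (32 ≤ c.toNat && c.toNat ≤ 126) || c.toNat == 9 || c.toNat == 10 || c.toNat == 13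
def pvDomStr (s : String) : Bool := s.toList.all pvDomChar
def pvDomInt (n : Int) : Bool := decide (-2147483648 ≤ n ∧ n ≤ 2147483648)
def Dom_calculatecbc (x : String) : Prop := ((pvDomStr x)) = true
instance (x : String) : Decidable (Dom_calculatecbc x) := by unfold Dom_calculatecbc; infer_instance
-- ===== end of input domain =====

-- B replaces A's reverse index loop (collect bracket values into a list, then a second
-- Horner multiply-accumulate pass) by one forward pass with a running power of 5 and no
-- intermediate list: simpler.

-- ===== PORT A =====
-- A scans indices len-1 .. 0, appending a value per open bracket, then Horner-folds the list.
-- x[i] is ported with pyGetD (exact here: every index the loop produces is in range, so Python never raises).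
def calculatecbc (x : String) : Int :=
  let cs := x.toList
  let counter : List Int :=
    (PySem.List.pyRange ((cs.length : Int) - 1) (-1) (-1)).foldl
      (fun acc i =>
        if PySem.List.pyGetD cs i ' ' = '(' then acc ++ [1]
        else if PySem.List.pyGetD cs i ' ' = '[' then acc ++ [2]
        else if PySem.List.pyGetD cs i ' ' = '{' then acc ++ [3]
        else if PySem.List.pyGetD cs i ' ' = '<' then acc ++ [4]
        else acc) []
  counter.foldl (fun count v => count * 5 + v) 0

-- ===== PORT B =====
-- forward pass over the characters: score += vals[ch] * p; p *= 5  (vals the dict of the four open brackets)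
def calculatecbc_alt (x : String) : Int :=
  let vals : PySem.Dict Char Int :=
    PySem.Dict.ofList [('(', 1), ('[', 2), ('{', 3), ('<', 4)]
  (x.toList.foldl
    (fun (sp : Int × Int) ch =>
      match vals.get? ch with
      | some v => (sp.1 + v * sp.2, sp.2 * 5)
      | none => sp) (0, 1)).1

-- ===== PRECONDITION & SPEC =====
def Spec_calculatecbc (x : String) (out : Int) : Prop := out = calculatecbc_alt x
instance (x : String) (out : Int) : Decidable (Spec_calculatecbc x out) := by unfold Spec_calculatecbc; infer_instance

-- ===== CLAIM (what is proved, stated in full; the proofs are below) =====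
def Claim_equal_calculatecbc : Prop := ∀ (x : String), Dom_calculatecbc x → Spec_calculatecbc x (calculatecbc x)

-- ===== LEMMAS AND PROOFS =====

-- value of an open bracket: the characterisation both ports are reduced to
def pvVal? (c : Char) : Option Int :=
  if c = '(' then some 1
  else if c = '[' then some 2
  else if c = '{' then some 3
  else if c = '<' then some 4
  else none

-- B's dict lookup is pvVal?
theorem get?_vals (c : Char) :
    (PySem.Dict.ofList [('(', (1:Int)), ('[', 2), ('{', 3), ('<', 4)]).get? c = pvVal? c := by
  unfold pvVal?
  simp [PySem.Dict.ofList, PySem.Dict.update, PySem.Dict.insert, PySem.Dict.empty,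
    PySem.Dict.get?_mk_cons]
  split_ifs <;> first | rfl | simp_all [eq_comm]

-- A's append-if chain is "append the value of pvVal?, if any"
theorem step_eq (acc : List Int) (c : Char) :
    (if c = '(' then acc ++ [(1:Int)]
     else if c = '[' then acc ++ [2]
     else if c = '{' then acc ++ [3]
     else if c = '<' then acc ++ [4]
     else acc) = acc ++ (pvVal? c).toList := by
  unfold pvVal?; split_ifs <;> simp

-- collecting optional values by appending is filterMap
theorem foldl_opt {α : Type} (f : α → Option Int) (l : List α) (acc : List Int) :
    l.foldl (fun acc a => acc ++ (f a).toList) acc = acc ++ l.filterMap f := by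
  induction l generalizing acc with
  | nil => simp
  | cons c t ih => cases h : f c <;> simp [h, ih]

-- positional base-5 sum, least-significant digit first
def pvS : List Int → Int
  | [] => 0
  | v :: t => v + 5 * pvS t

-- Horner over a reversed list is the positional sum
theorem horner_reverse (l : List Int) :
    l.reverse.foldl (fun count v => count * 5 + v) 0 = pvS l := by
  induction l with
  | nil => rfl
  | cons v t ih => simp [List.foldl_append, pvS, ih]; ring

-- B's running-power fold invariant
theorem foldB_inv (l : List Char) (s p : Int) :
    (l.foldl
      (fun (sp : Int × Int) ch =>
        match pvVal? ch with
        | some v => (sp.1 + v * sp.2, sp.2 * 5)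
        | none => sp) (s, p)).1 = s + p * pvS (l.filterMap pvVal?) := by
  induction l generalizing s p with
  | nil => simp [pvS]
  | cons c t ih =>
    simp only [List.foldl_cons, List.filterMap_cons]
    cases h : pvVal? c with
    | none => simp [ih]
    | some v => simp [ih, pvS]; ring

-- ===== VERDICT (by name: the statement is the Claim_ definition above) =====
theorem calculatecbc_spec : Claim_equal_calculatecbc := by
  intro x _
  unfold Spec_calculatecbc calculatecbc calculatecbc_alt
  simp only [step_eq, get?_vals]
  rw [PySem.List.pyRange_neg_one_eq_reverse]
  have hr : (-1 : Int) + 1 = 0 := by norm_num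
  have hn : (x.toList.length : Int) - 1 + 1 = (x.toList.length : Int) := by ring
  rw [hr, hn]
  rw [foldl_opt, List.nil_append]
  have hmap : (PySem.List.pyRange 0 (x.toList.length : Int) 1).reverse.map
      (fun i => PySem.List.pyGetD x.toList i ' ') = x.toList.reverse := by
    rw [List.map_reverse, PySem.List.map_pyGetD_pyRange_zero']
  have hfm : (PySem.List.pyRange 0 (x.toList.length : Int) 1).reverse.filterMap
      (fun i => pvVal? (PySem.List.pyGetD x.toList i ' ')) =
      x.toList.reverse.filterMap pvVal? := by
    rw [← hmap, List.filterMap_map]; rfl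
  rw [hfm, List.filterMap_reverse, horner_reverse, foldB_inv]
  ring
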